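-- pv_equiv track=rewrite | github.com/zoltanzack/Unibots21-Reading | scripts/modules/vision_oldold.py | updateDirectionList
-- ===== SOURCE A (Python) =====
-- def updateDirectionList(list, newVal, pos = 0):
--     old = newVal
--     if newVal[0] > list[pos][0]:
--         old = list[pos]
--         list[pos] = newVal
--
--     if pos == len(list)-1:
--         return list
--     else:
--         return updateDirectionList(list, old, pos+1)
-- ===== SOURCE B (Python) =====
-- def updateDirectionList(list, newVal, pos=0):
--     last = len(list) - 1
--     carry = newVal
--     while True:
--         cur = list[pos]
--         if carry[0] > cur[0]:
--             list[pos] = carry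
--             carry = cur
--         if pos == last:
--             return list
--         pos += 1
-- ===== Notes on version B (the rewrite author's own statement) =====
-- stated objective: simpler
-- what changed: Replaced A's tail-recursion (one stack frame per index, re-evaluating len(list)-1 each call) by a flat explicit while loop with a carry variable and the last index precomputed once.
import Mathlib
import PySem

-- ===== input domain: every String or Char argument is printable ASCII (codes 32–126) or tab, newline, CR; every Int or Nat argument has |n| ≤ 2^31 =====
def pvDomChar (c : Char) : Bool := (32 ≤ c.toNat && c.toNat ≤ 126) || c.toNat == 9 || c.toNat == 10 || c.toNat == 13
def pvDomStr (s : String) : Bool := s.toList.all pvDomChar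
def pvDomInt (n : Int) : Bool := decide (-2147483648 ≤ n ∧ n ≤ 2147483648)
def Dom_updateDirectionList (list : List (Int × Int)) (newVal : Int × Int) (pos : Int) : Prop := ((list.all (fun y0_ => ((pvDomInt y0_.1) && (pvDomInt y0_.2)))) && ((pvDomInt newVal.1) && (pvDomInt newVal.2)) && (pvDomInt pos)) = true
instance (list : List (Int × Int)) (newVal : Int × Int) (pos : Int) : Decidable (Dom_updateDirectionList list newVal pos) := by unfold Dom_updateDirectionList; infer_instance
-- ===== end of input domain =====

-- B replaces A's tail-recursion by an explicit while loop with a carry and a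
-- precomputed last index (same values; both mutate the list argument in place in Python).
-- Equivalence is about the return value; B performs the same in-place mutation as A.

-- ===== PORT A =====
-- A recurses; list[pos] raises IndexError out of range → pyGet? none; that case is
-- outside Pre_ and the port returns [] there.
def updateDirectionList (list : List (Int × Int)) (newVal : Int × Int) (pos : Int) : List (Int × Int) :=
  match h : PySem.List.pyGet? list pos with
  | none => []
  | some cur =>
    -- old = newVal; if newVal[0] > list[pos][0]: old = list[pos]; list[pos] = newVal
    let p : (Int × Int) × List (Int × Int) :=
      if newVal.1 > cur.1 then (cur, PySem.List.pySetD list pos newVal) else (newVal, list)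
    if pos = (p.2.length : Int) - 1 then p.2
    else updateDirectionList p.2 p.1 (pos + 1)
termination_by (list.length - pos).toNat
decreasing_by
  have hr : PySem.Raise.InRange list.length pos := by
    by_contra hn
    rw [← PySem.List.pyGet?_eq_none_iff] at hn
    simp [hn] at h
  obtain ⟨_, hr2⟩ := hr
  split <;> simp [PySem.List.length_pySetD] <;> omega

-- ===== PORT B =====
-- the `while True` body: cur = list[pos]; conditional swap into carry; stop at `last`.
def updLoopB (l : List (Int × Int)) (carry : Int × Int) (pos : Int) (last : Int) : List (Int × Int) :=
  match h : PySem.List.pyGet? l pos with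
  | none => l
  | some cur =>
    let l' := if carry.1 > cur.1 then PySem.List.pySetD l pos carry else l
    let carry' := if carry.1 > cur.1 then cur else carry
    if pos = last then l' else updLoopB l' carry' (pos + 1) last
termination_by (l.length - pos).toNat
decreasing_by
  have hr : PySem.Raise.InRange l.length pos := by
    by_contra hn
    rw [← PySem.List.pyGet?_eq_none_iff] at hn
    simp [hn] at h
  obtain ⟨_, hr2⟩ := hr
  split <;> simp [PySem.List.length_pySetD] <;> omega

def updateDirectionList_alt (list : List (Int × Int)) (newVal : Int × Int) (pos : Int) : List (Int × Int) :=
  updLoopB list newVal pos ((list.length : Int) - 1)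

-- ===== PRECONDITION & SPEC =====
-- Pre_ = exactly the inputs on which Python A returns (elsewhere list[pos] raises IndexError).
def Pre_updateDirectionList (list : List (Int × Int)) (_newVal : Int × Int) (pos : Int) : Prop :=
  list ≠ [] ∧ -(list.length : Int) ≤ pos ∧ pos ≤ (list.length : Int) - 1
instance (list : List (Int × Int)) (newVal : Int × Int) (pos : Int) : Decidable (Pre_updateDirectionList list newVal pos) := by unfold Pre_updateDirectionList; infer_instance
def pvWitness_updateDirectionList : (List (Int × Int)) × (Int × Int) × Int := ([(3, 1), (1, 2)], (2, 7), 0)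
def Spec_updateDirectionList (list : List (Int × Int)) (newVal : Int × Int) (pos : Int) (out : List (Int × Int)) : Prop := out = updateDirectionList_alt list newVal pos
instance (list : List (Int × Int)) (newVal : Int × Int) (pos : Int) (out : List (Int × Int)) : Decidable (Spec_updateDirectionList list newVal pos out) := by unfold Spec_updateDirectionList; infer_instance

-- ===== CLAIM (what is proved, stated in full; the proofs are below) =====
def Claim_equal_updateDirectionList : Prop := ∀ (list : List (Int × Int)) (newVal : Int × Int) (pos : Int), Dom_updateDirectionList list newVal pos → Pre_updateDirectionList list newVal pos → Spec_updateDirectionList list newVal pos (updateDirectionList list newVal pos)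

-- ===== LEMMAS AND PROOFS =====

-- A equals B's loop whenever `last` is the (invariant) last index of the list.
theorem updA_eq_loopB (list : List (Int × Int)) (newVal : Int × Int) (pos last : Int)
    (hl : last = (list.length : Int) - 1)
    (hlo : -(list.length : Int) ≤ pos) (hhi : pos ≤ (list.length : Int) - 1) :
    updateDirectionList list newVal pos = updLoopB list newVal pos last := by
  fun_induction updateDirectionList list newVal pos generalizing last with
  | case1 l nv pos h =>
    rw [PySem.List.pyGet?_eq_none_iff] at h
    exact absurd ⟨by omega, by omega⟩ h
  | case2 l nv pos cur h p hstop =>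
    rw [updLoopB]
    split
    · simp_all
    · rename_i cur' h'
      rw [h] at h'
      injection h' with h'
      subst h'
      have hlen : p.2.length = l.length := by
        simp only [p]; split <;> simp [PySem.List.length_pySetD]
      have hpl : pos = last := by omega
      rw [if_pos hpl]
      by_cases hc : nv.1 > cur.1 <;> simp [p, hc]
  | case3 l nv pos cur h p hstop ih =>
    rw [updLoopB]
    split
    · simp_all
    · rename_i cur' h'
      rw [h] at h'
      injection h' with h'
      subst h'
      have hlen : p.2.length = l.length := by
        simp only [p]; split <;> simp [PySem.List.length_pySetD]
      have hne : pos ≠ last := by omega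
      rw [if_neg hne, ih last (by omega) (by omega) (by omega)]
      by_cases hc : nv.1 > cur.1 <;> simp [p, hc]

-- ===== VERDICT (by name: the statement is the Claim_ definition above) =====
theorem updateDirectionList_spec : Claim_equal_updateDirectionList := by
  intro list newVal pos _ hpre
  obtain ⟨_, h1, h2⟩ := hpre
  unfold Spec_updateDirectionList updateDirectionList_alt
  exact updA_eq_loopB list newVal pos _ rfl h1 h2
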